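-- pv_equiv track=rewrite | github.com/the-omega-institute/automath | theory/2026_golden_ratio_driven_scan_projection_generation_recursive_emergence/scripts/exp_window6_c6_orbit_patisalam_seed.py | _K_of_m
-- ===== SOURCE A (Python) =====
-- def _K_of_m(m: int) -> int:
--     """Return K(m) s.t. F_{K+1} <= 2^m-1 < F_{K+2} (F_1=F_2=1)."""
--     if m < 0:
--         raise ValueError("m must be non-negative")
--     target = (1 << m) - 1
--     # Fibonacci sequence by index (1-based): F_1=F_2=1.
--     f1, f2 = 1, 1
--     idx = 2
--     while f2 <= target:
--         f1, f2 = f2, f1 + f2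
--         idx += 1
--     # Now F_idx = f2 > target and F_{idx-1} <= target.
--     # We need K such that K+2 = idx.
--     return idx - 2
-- ===== SOURCE B (Python) =====
-- def _K_of_m(m: int) -> int:
--     """Return K(m) s.t. F_{K+1} <= 2^m-1 < F_{K+2} (F_1=F_2=1)."""
--     if m < 0:
--         raise ValueError("m must be non-negative")
--     target = (1 << m) - 1
--
--     def fib_pair(n):
--         # (F_n, F_{n+1}) by fast doubling, zero-based Fibonacci.
--         if n <= 0:
--             return (0, 1)
--         a, b = fib_pair(n // 2)
--         c = a * (2 * b - a)
--         d = a * a + b * b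
--         if n % 2 == 1:
--             return (d, c + d)
--         return (c, d)
--
--     # Binary search for the least k in [0, 2*m+1) with F_{k+2} > target
--     # (F_{2m+2} >= 2^m > target, so the answer lies in this range).
--     lo, hi = 0, 2 * m + 1
--     while lo < hi:
--         mid = (lo + hi) // 2
--         if fib_pair(mid + 2)[0] > target:
--             hi = mid
--         else:
--             lo = mid + 1
--     return lo
-- ===== Notes on version B (the rewrite author's own statement) =====
-- stated objective: faster
-- what changed: Replaced the linear Fibonacci-generating while-loop by a binary search over the index K using fast-doubling Fibonacci, so only O(log m) Fibonacci values are computed instead of O(m).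
import Mathlib
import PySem

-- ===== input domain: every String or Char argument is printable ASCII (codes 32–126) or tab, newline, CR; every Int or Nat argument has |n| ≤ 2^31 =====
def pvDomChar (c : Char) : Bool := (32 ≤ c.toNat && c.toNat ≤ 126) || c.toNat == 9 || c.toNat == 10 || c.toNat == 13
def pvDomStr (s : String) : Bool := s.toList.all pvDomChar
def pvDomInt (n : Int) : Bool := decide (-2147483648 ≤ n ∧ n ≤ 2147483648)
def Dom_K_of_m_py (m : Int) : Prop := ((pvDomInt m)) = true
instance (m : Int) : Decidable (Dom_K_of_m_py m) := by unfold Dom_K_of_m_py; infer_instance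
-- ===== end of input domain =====

-- B replaces A's linear Fibonacci while-loop by a binary search over the index
-- with fast-doubling Fibonacci (faster: O(log m) Fibonacci evaluations vs O(m) additions).

-- ===== PORT A =====
-- A's while-loop: state (f1, f2, idx); runs while f2 <= target.  The fuel is a
-- totality guard only: 2*m+1 iterations always suffice (proved below), so on
-- every input admitted by Pre_ the fuel is never exhausted.
def loopA : Nat → Int → Int → Int → Int → Int
  | 0, _f1, _f2, idx, _target => idx
  | fuel + 1, f1, f2, idx, target =>
      if f2 ≤ target then loopA fuel f2 (f1 + f2) (idx + 1) target else idx

def K_of_m_py (m : Int) : Int :=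
  -- (1 << m) - 1, exact on Pre_ (Python raises ValueError for negative m)
  let target : Int := 2 ^ m.toNat - 1
  loopA (2 * m.toNat + 1) 1 1 2 target - 2

-- ===== PORT B =====
-- fib_pair n = (F_n, F_{n+1}) by fast doubling (zero-based Fibonacci).
def fibPair (n : Int) : Int × Int :=
  if _h : n ≤ 0 then (0, 1)
  else
    let p := fibPair (PySem.Int.floordiv n 2)
    let a := p.1
    let b := p.2
    let c := a * (2 * b - a)
    let d := a * a + b * b
    if PySem.Int.mod n 2 = 1 then (d, c + d) else (c, d)
termination_by n.toNat
decreasing_by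
  rw [PySem.Int.floordiv_eq_ediv_of_pos (by omega : (0:Int) < 2)]
  omega

-- the binary-search while-loop of B
def bsearch (target lo hi : Int) : Int :=
  if h : lo < hi then
    if target < (fibPair (PySem.Int.floordiv (lo + hi) 2 + 2)).1 then
      bsearch target lo (PySem.Int.floordiv (lo + hi) 2)
    else
      bsearch target (PySem.Int.floordiv (lo + hi) 2 + 1) hi
  else lo
termination_by (hi - lo).toNat
decreasing_by
  · rw [PySem.Int.floordiv_eq_ediv_of_pos (by omega : (0:Int) < 2)]; omega
  · rw [PySem.Int.floordiv_eq_ediv_of_pos (by omega : (0:Int) < 2)]; omega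

def K_of_m_py_alt (m : Int) : Int :=
  -- (1 << m) - 1, exact on Pre_ (Python raises ValueError for negative m)
  let target : Int := 2 ^ m.toNat - 1
  bsearch target 0 (2 * m + 1)

-- ===== PRECONDITION & SPEC =====
-- Python A raises ValueError for negative m; Pre_ admits exactly the inputs where A returns.
def Pre_K_of_m_py (m : Int) : Prop := 0 ≤ m
instance (m : Int) : Decidable (Pre_K_of_m_py m) := by unfold Pre_K_of_m_py; infer_instance
def pvWitness_K_of_m_py : Int := 5

def Spec_K_of_m_py (m : Int) (out : Int) : Prop := out = K_of_m_py_alt m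
instance (m : Int) (out : Int) : Decidable (Spec_K_of_m_py m out) := by unfold Spec_K_of_m_py; infer_instance

-- ===== CLAIM (what is proved, stated in full; the proofs are below) =====
def Claim_equal_K_of_m_py : Prop := ∀ (m : Int), Dom_K_of_m_py m → Pre_K_of_m_py m → Spec_K_of_m_py m (K_of_m_py m)

-- ===== LEMMAS AND PROOFS =====

-- 2^k ≤ F_{2k+2}: gives the upper bound used for A's fuel and B's initial hi.
theorem pow_le_fib (k : Nat) : 2 ^ k ≤ Nat.fib (2 * k + 2) := by
  induction k with
  | zero => simp
  | succ k ih =>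
      have h1 : Nat.fib (2 * k + 2) ≤ Nat.fib (2 * k + 3) := Nat.fib_le_fib_succ
      have h2 : Nat.fib (2 * k + 4) = Nat.fib (2 * k + 2) + Nat.fib (2 * k + 3) := by
        have e : 2 * k + 4 = (2 * k + 2) + 2 := by omega
        rw [e, Nat.fib_add_two]
      have e4 : 2 * (k + 1) + 2 = 2 * k + 4 := by omega
      rw [e4, h2, pow_succ]
      omega

-- A's loop computes (2 more than) the least r with target < F_{r+2}.
theorem loopA_spec (fuel : Nat) (T : Int) :
    ∀ t : Nat, T < (Nat.fib (t + fuel + 2) : Int) →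
    (∀ j : Nat, j < t → (Nat.fib (j + 2) : Int) ≤ T) →
    ∃ r : Nat, loopA fuel (Nat.fib (t + 1)) (Nat.fib (t + 2)) ((t : Int) + 2) T = (r : Int) + 2 ∧
      T < (Nat.fib (r + 2) : Int) ∧ ∀ j : Nat, j < r → (Nat.fib (j + 2) : Int) ≤ T := by
  induction fuel with
  | zero =>
      intro t hT hprev
      exact ⟨t, rfl, by simpa using hT, hprev⟩
  | succ fuel ih =>
      intro t hT hprev
      by_cases h : (Nat.fib (t + 2) : Int) ≤ T
      · have hT' : T < (Nat.fib ((t + 1) + fuel + 2) : Int) := by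
          have : (t + 1) + fuel + 2 = t + (fuel + 1) + 2 := by ring
          rwa [this]
        have hprev' : ∀ j : Nat, j < t + 1 → (Nat.fib (j + 2) : Int) ≤ T := by
          intro j hj
          rcases Nat.lt_succ_iff_lt_or_eq.mp hj with hj' | hj'
          · exact hprev j hj'
          · subst hj'; exact h
        obtain ⟨r, hr, hr1, hr2⟩ := ih (t + 1) hT' hprev'
        refine ⟨r, ?_, hr1, hr2⟩
        have hstep : (Nat.fib (t + 1) : Int) + Nat.fib (t + 2) = (Nat.fib ((t + 1) + 2) : Int) := by
          have : (t + 1) + 2 = t + 3 := by ring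
          rw [this]
          have : Nat.fib (t + 3) = Nat.fib (t + 1) + Nat.fib (t + 2) := by
            have h3 : t + 3 = (t + 1) + 2 := by ring
            rw [h3, Nat.fib_add_two]
          rw [this]; push_cast; ring
        simp only [loopA, if_pos h]
        rw [← hr]
        have hcast : ((t : Int) + 2) + 1 = ((t + 1 : Nat) : Int) + 2 := by push_cast; ring
        rw [hcast, hstep]
      · refine ⟨t, ?_, by omega, hprev⟩
        simp only [loopA, if_neg h]

-- fast doubling is correct
theorem fibPair_spec (n : Nat) : fibPair (n : Int) = ((Nat.fib n : Int), (Nat.fib (n + 1) : Int)) := by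
  induction n using Nat.strong_induction_on with
  | _ n ih =>
      rcases Nat.eq_zero_or_pos n with h0 | hpos
      · subst h0; rw [fibPair]; simp
      · rw [fibPair]
        have hne : ¬ ((n : Int) ≤ 0) := by omega
        rw [dif_neg hne]
        have hdiv : PySem.Int.floordiv (n : Int) 2 = ((n / 2 : Nat) : Int) := by
          exact_mod_cast PySem.Int.floordiv_natCast n 2
        have hmod : PySem.Int.mod (n : Int) 2 = ((n % 2 : Nat) : Int) := by
          exact_mod_cast PySem.Int.mod_natCast n 2
        rw [hdiv, hmod, ih (n / 2) (by omega)]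
        set k := n / 2 with hk
        have hfle : Nat.fib k ≤ Nat.fib (k + 1) := Nat.fib_le_fib_succ
        have hc : ((Nat.fib k : Int)) * (2 * (Nat.fib (k + 1) : Int) - Nat.fib k)
            = (Nat.fib (2 * k) : Int) := by
          rw [Nat.fib_two_mul, Nat.cast_mul, Nat.cast_sub (by omega)]
          push_cast; ring
        have hd : ((Nat.fib k : Int)) * Nat.fib k + (Nat.fib (k + 1) : Int) * Nat.fib (k + 1)
            = (Nat.fib (2 * k + 1) : Int) := by
          rw [Nat.fib_two_mul_add_one]
          push_cast; ring
        rcases Nat.mod_two_eq_zero_or_one n with hpar | hpar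
        · have hn : n = 2 * k := by omega
          rw [hpar, hn]
          norm_num [Prod.ext_iff]
          exact ⟨hc, hd⟩
        · have hn : n = 2 * k + 1 := by omega
          have hsum : (Nat.fib (2 * k) : Int) + (Nat.fib (2 * k + 1) : Int)
              = (Nat.fib (2 * k + 2) : Int) := by
            rw [Nat.fib_add_two]; push_cast; ring
          rw [hpar, hn]
          norm_num [Prod.ext_iff]
          refine ⟨hd, ?_⟩
          rw [hc, hd, show 2 * k + 1 + 1 = 2 * k + 2 from by omega]
          exact hsum

-- B's binary search computes the least r with target < F_{r+2}.
theorem bsearch_spec (T : Int) :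
    ∀ k : Nat, ∀ lo hi : Int, (hi - lo).toNat ≤ k → 0 ≤ lo → lo ≤ hi →
    (∀ j : Nat, (j : Int) < lo → (Nat.fib (j + 2) : Int) ≤ T) →
    T < (Nat.fib (hi.toNat + 2) : Int) →
    ∃ r : Nat, bsearch T lo hi = (r : Int) ∧
      T < (Nat.fib (r + 2) : Int) ∧ ∀ j : Nat, j < r → (Nat.fib (j + 2) : Int) ≤ T := by
  intro k
  induction k with
  | zero =>
      intro lo hi hk h0 hle hlo hhi
      have heq : lo = hi := by omega
      rw [bsearch, dif_neg (by omega)]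
      refine ⟨lo.toNat, by omega, ?_, ?_⟩
      · have : lo.toNat = hi.toNat := by omega
        rwa [this]
      · intro j hj; exact hlo j (by omega)
  | succ k ih =>
      intro lo hi hk h0 hle hlo hhi
      by_cases hlt : lo < hi
      · rw [bsearch, dif_pos hlt]
        have hmid : PySem.Int.floordiv (lo + hi) 2 = (lo + hi) / 2 :=
          PySem.Int.floordiv_eq_ediv_of_pos (by omega)
        rw [hmid]
        have hb1 : lo ≤ (lo + hi) / 2 := by omega
        have hb2 : (lo + hi) / 2 < hi := by omega
        have hmcast : (lo + hi) / 2 + 2 = ((((lo + hi) / 2).toNat + 2 : Nat) : Int) := by omega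
        have hfp : (fibPair ((lo + hi) / 2 + 2)).1
            = (Nat.fib (((lo + hi) / 2).toNat + 2) : Int) := by
          rw [hmcast, fibPair_spec]
        by_cases hc : T < (fibPair ((lo + hi) / 2 + 2)).1
        · rw [if_pos hc]
          refine ih lo ((lo + hi) / 2) (by omega) h0 hb1 hlo ?_
          rw [hfp] at hc
          exact hc
        · rw [if_neg hc]
          have hcle : (Nat.fib (((lo + hi) / 2).toNat + 2) : Int) ≤ T := by
            rw [← hfp]; omega
          refine ih ((lo + hi) / 2 + 1) hi (by omega) (by omega) (by omega) ?_ hhi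
          intro j hj
          have hmono : (Nat.fib (j + 2) : Int) ≤ (Nat.fib (((lo + hi) / 2).toNat + 2) : Int) := by
            exact_mod_cast Nat.fib_mono (by omega)
          omega
      · have heq : lo = hi := by omega
        rw [bsearch, dif_neg (by omega)]
        refine ⟨lo.toNat, by omega, ?_, ?_⟩
        · have : lo.toNat = hi.toNat := by omega
          rwa [this]
        · intro j hj; exact hlo j (by omega)

-- the least r is unique
theorem least_unique (T : Int) (r r' : Nat)
    (h1 : T < (Nat.fib (r + 2) : Int)) (h2 : ∀ j : Nat, j < r → (Nat.fib (j + 2) : Int) ≤ T)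
    (h3 : T < (Nat.fib (r' + 2) : Int)) (h4 : ∀ j : Nat, j < r' → (Nat.fib (j + 2) : Int) ≤ T) :
    r = r' := by
  rcases lt_trichotomy r r' with h | h | h
  · exact absurd h1 (not_lt.mpr (h4 r h))
  · exact h
  · exact absurd h3 (not_lt.mpr (h2 r' h))

-- target bound: 2^M - 1 < F_{n+2} whenever 2M+1 ≤ n (in particular n = 2M+1)
theorem target_lt_fib (M n : Nat) (h : 2 * M + 1 ≤ n) :
    (2 : Int) ^ M - 1 < (Nat.fib (n + 2) : Int) := by
  have h1 : 2 ^ M ≤ Nat.fib (2 * M + 2) := pow_le_fib M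
  have h2 : Nat.fib (2 * M + 2) ≤ Nat.fib (n + 2) := Nat.fib_mono (by omega)
  have h3 : (2 : Int) ^ M = ((2 ^ M : Nat) : Int) := by push_cast; ring
  rw [h3]
  have := le_trans h1 h2
  omega

-- ===== VERDICT (by name: the statement is the Claim_ definition above) =====
theorem K_of_m_py_spec : Claim_equal_K_of_m_py := by
  intro m _hdom hpre
  unfold Pre_K_of_m_py at hpre
  unfold Spec_K_of_m_py K_of_m_py K_of_m_py_alt
  show loopA (2 * m.toNat + 1) 1 1 2 (2 ^ m.toNat - 1) - 2
      = bsearch (2 ^ m.toNat - 1) 0 (2 * m + 1)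
  have htop : ((2 : Int) ^ m.toNat - 1) < (Nat.fib (0 + (2 * m.toNat + 1) + 2) : Int) := by
    rw [show 0 + (2 * m.toNat + 1) + 2 = (2 * m.toNat + 1) + 2 from by omega]
    exact target_lt_fib m.toNat (2 * m.toNat + 1) (le_refl _)
  obtain ⟨r, hrA, hr1, hr2⟩ :=
    loopA_spec (2 * m.toNat + 1) (2 ^ m.toNat - 1) 0 htop (by intro j hj; omega)
  have htop2 : ((2 : Int) ^ m.toNat - 1) < (Nat.fib ((2 * m + 1).toNat + 2) : Int) := by
    rw [show (2 * m + 1).toNat = 2 * m.toNat + 1 from by omega]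
    exact target_lt_fib m.toNat (2 * m.toNat + 1) (le_refl _)
  obtain ⟨r', hrB, hr3, hr4⟩ :=
    bsearch_spec (2 ^ m.toNat - 1) (2 * m + 1).toNat 0 (2 * m + 1) (by omega) (le_refl 0)
      (by omega) (by intro j hj; omega) htop2
  have hA2 : loopA (2 * m.toNat + 1) 1 1 2 ((2 : Int) ^ m.toNat - 1) = (r' : Int) + 2 := by
    have e := hrA
    rw [least_unique _ r r' hr1 hr2 hr3 hr4] at e
    simpa [Nat.fib_one, Nat.fib_two] using e
  rw [hrB, hA2]
  omega
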